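-- pv_equiv track=rewrite | github.com/laurenelizabethroberts/weblog-threat-hunter | src/webloghunter/timebucket.py | bucketize_per_host
-- ===== SOURCE A (Python) =====
-- from typing import Iterable, Dict, Tuple
-- from collections import defaultdict
--
-- def bucketize_per_host(
--     rows: Iterable[Tuple[str, int]], window_seconds: int
-- ) -> Dict[str, Dict[int, int]]:
--     """
--     rows: iterable of (host, epoch_seconds)
--     returns: host -> { bucket_start_epoch: count }
--     """
--     res: Dict[str, Dict[int, int]] = defaultdict(lambda: defaultdict(int))
--     for host, t in rows:
--         bstart = (t // window_seconds) * window_seconds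
--         res[host][bstart] += 1
--     return res
-- ===== SOURCE B (Python) =====
-- from collections import defaultdict
--
-- def bucketize_per_host(rows, window_seconds):
--     rows = list(rows)
--     res = defaultdict(lambda: defaultdict(int))
--     for host in dict.fromkeys(h for h, _ in rows):
--         buckets = [t // window_seconds * window_seconds for h, t in rows if h == host]
--         inner = res[host]
--         for b in buckets:
--             if b not in inner:
--                 inner[b] = buckets.count(b)
--     return res
-- ===== Notes on version B (the rewrite author's own statement) =====
-- stated objective: alternative
-- what changed: Replaces A's single pass incrementing a nested defaultdict by a group-by decomposition: an ordered dedup of hosts, then for each host a filtered bucket list whose per-bucket counts are obtained by list.count over deduped buckets, with no incrementing counter anywhere.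
import Mathlib
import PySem

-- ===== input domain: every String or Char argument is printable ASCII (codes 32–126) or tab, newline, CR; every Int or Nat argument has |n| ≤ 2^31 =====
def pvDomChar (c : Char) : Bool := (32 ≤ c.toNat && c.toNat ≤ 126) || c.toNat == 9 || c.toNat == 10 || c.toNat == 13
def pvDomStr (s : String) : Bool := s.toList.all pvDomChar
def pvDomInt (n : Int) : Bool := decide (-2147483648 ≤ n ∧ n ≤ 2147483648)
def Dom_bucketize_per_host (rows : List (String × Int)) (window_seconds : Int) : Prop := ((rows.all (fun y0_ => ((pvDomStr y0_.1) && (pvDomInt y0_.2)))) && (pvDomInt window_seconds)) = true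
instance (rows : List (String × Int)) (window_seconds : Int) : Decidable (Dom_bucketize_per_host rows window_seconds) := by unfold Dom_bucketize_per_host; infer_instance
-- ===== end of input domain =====

-- B replaces A's single counting pass over a nested defaultdict by a group-by decomposition:
-- ordered dedup of hosts, then per host a filtered bucket list counted via list.count
-- (objective: alternative algorithm, not claimed faster).

-- ===== PORT A =====
-- one pass: res[host][bstart] += 1 on a defaultdict(lambda: defaultdict(int))
def bucketize_per_host (rows : List (String × Int)) (window_seconds : Int) : List (String × List (Int × Int)) :=
  let res : PySem.Dict String (PySem.Dict Int Int) :=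
    rows.foldl (fun res p =>
      let bstart := PySem.Int.floordiv p.2 window_seconds * window_seconds
      res.modify p.1 PySem.Dict.empty (fun inner => inner.modify bstart 0 (· + 1))) PySem.Dict.empty
  res.items.map (fun q => (q.1, q.2.items))

-- ===== PORT B =====
-- for each host in dict.fromkeys(...) order: filter its bucket list, then dedupe it in order,
-- each new bucket getting buckets.count(b)
def bucketize_per_host_alt (rows : List (String × Int)) (window_seconds : Int) : List (String × List (Int × Int)) :=
  let hosts := PySem.List.dedup (rows.map (fun p => p.1))
  let res : PySem.Dict String (PySem.Dict Int Int) :=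
    hosts.foldl (fun r host =>
      let buckets := (rows.filter (fun p => p.1 == host)).map
        (fun p => PySem.Int.floordiv p.2 window_seconds * window_seconds)
      let inner := buckets.foldl (fun d b =>
        if d.contains b then d else d.insert b ((PySem.List.count buckets b : Int))) PySem.Dict.empty
      r.insert host inner) PySem.Dict.empty
  res.items.map (fun q => (q.1, q.2.items))

-- ===== PRECONDITION & SPEC =====
-- A raises ZeroDivisionError (t // 0) when window_seconds = 0 and rows is non-empty; excluded.
def Pre_bucketize_per_host (rows : List (String × Int)) (window_seconds : Int) : Prop :=
  window_seconds ≠ 0 ∨ rows = []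
instance (rows : List (String × Int)) (window_seconds : Int) : Decidable (Pre_bucketize_per_host rows window_seconds) := by unfold Pre_bucketize_per_host; infer_instance
def pvWitness_bucketize_per_host : (List (String × Int)) × Int := ([("a", 7), ("b", -3), ("a", 8)], 5)
def Spec_bucketize_per_host (rows : List (String × Int)) (window_seconds : Int) (out : List (String × List (Int × Int))) : Prop := out = bucketize_per_host_alt rows window_seconds
instance (rows : List (String × Int)) (window_seconds : Int) (out : List (String × List (Int × Int))) : Decidable (Spec_bucketize_per_host rows window_seconds out) := by unfold Spec_bucketize_per_host; infer_instance

-- ===== CLAIM (what is proved, stated in full; the proofs are below) =====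
def Claim_equal_bucketize_per_host : Prop := ∀ (rows : List (String × Int)) (window_seconds : Int), Dom_bucketize_per_host rows window_seconds → Pre_bucketize_per_host rows window_seconds → Spec_bucketize_per_host rows window_seconds (bucketize_per_host rows window_seconds)

-- ===== LEMMAS AND PROOFS =====

-- the bucket list of one host, as B computes it
def pvBuckets (rows : List (String × Int)) (w : Int) (h : String) : List Int :=
  (rows.filter (fun p => p.1 == h)).map (fun p => PySem.Int.floordiv p.2 w * w)

theorem pvBuckets_append (rows : List (String × Int)) (w : Int) (p : String × Int) (h : String) :
    pvBuckets (rows ++ [p]) w h =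
      pvBuckets rows w h ++ (if p.1 = h then [PySem.Int.floordiv p.2 w * w] else []) := by
  simp only [pvBuckets, List.filter_append]
  by_cases hp : p.1 = h <;> simp [hp]

-- A's accumulated dict, characterised: hosts in first-seen order, inner dict = Counter of that host's buckets
theorem pvAChar (rows : List (String × Int)) (w : Int) :
    (rows.foldl (fun res p =>
        res.modify p.1 PySem.Dict.empty
          (fun inner => inner.modify (PySem.Int.floordiv p.2 w * w) 0 (· + 1)))
      (PySem.Dict.empty : PySem.Dict String (PySem.Dict Int Int))).items
    = (PySem.Set.ofList (rows.map (fun p => p.1))).map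
        (fun h => (h, PySem.Dict.counter (pvBuckets rows w h))) := by
  induction rows using List.reverseRecOn with
  | nil => rfl
  | append_singleton rows p ih =>
    rw [List.foldl_append, List.foldl_cons, List.foldl_nil]
    set R := rows.foldl (fun res q =>
        res.modify q.1 PySem.Dict.empty
          (fun inner => inner.modify (PySem.Int.floordiv q.2 w * w) 0 (· + 1)))
      (PySem.Dict.empty : PySem.Dict String (PySem.Dict Int Int)) with hR
    have hkeys : R.keys = PySem.Set.ofList (rows.map (fun p => p.1)) := by
      simp [PySem.Dict.keys, ih, List.map_map, Function.comp_def]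
    have hnd : R.keys.Nodup := by rw [hkeys]; exact PySem.Set.nodup_ofList _
    have hset : PySem.Set.ofList ((rows ++ [p]).map (fun p => p.1))
        = PySem.Set.add (PySem.Set.ofList (rows.map (fun p => p.1))) p.1 := by
      rw [List.map_append, PySem.Set.ofList_eq_foldl, List.foldl_append,
        ← PySem.Set.ofList_eq_foldl]
      rfl
    by_cases hmem : p.1 ∈ PySem.Set.ofList (rows.map (fun p => p.1))
    · have hcon : R.contains p.1 = true :=
        (PySem.Dict.contains_iff_mem_keys R p.1).mpr (hkeys ▸ hmem)
      have hget : R.getD p.1 PySem.Dict.empty = PySem.Dict.counter (pvBuckets rows w p.1) :=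
        PySem.Dict.getD_of_mem_items R
          (by rw [ih]; exact List.mem_map_of_mem hmem) hnd _
      have hadd : PySem.Set.add (PySem.Set.ofList (rows.map (fun p => p.1))) p.1
          = PySem.Set.ofList (rows.map (fun p => p.1)) := by
        simp [PySem.Set.add, hmem]
      show (R.insert p.1 ((R.getD p.1 PySem.Dict.empty).modify
          (PySem.Int.floordiv p.2 w * w) 0 (· + 1))).items = _
      rw [PySem.Dict.items_insert_of_contains _ _ hcon, ih, hset, hadd, List.map_map]
      apply List.map_congr_left
      intro h _
      simp only [Function.comp]
      by_cases hh : h = p.1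
      · subst hh
        rw [if_pos (by simp), hget, ← PySem.Dict.counter_append_singleton,
          pvBuckets_append, if_pos rfl]
      · rw [if_neg (by simpa using Ne.symm (fun e => hh e.symm)), pvBuckets_append,
          if_neg (fun e => hh e.symm), List.append_nil]
    · have hcon : R.contains p.1 = false := by
        by_contra hc
        exact hmem (hkeys ▸ (PySem.Dict.contains_iff_mem_keys R p.1).mp
          (by revert hc; cases R.contains p.1 <;> simp))
      have hget : R.getD p.1 PySem.Dict.empty = PySem.Dict.empty :=
        PySem.Dict.getD_of_not_contains R _ hcon
      have hnotrow : ∀ q ∈ rows, q.1 ≠ p.1 := by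
        intro q hq he
        exact hmem ((PySem.Set.mem_ofList _ _).mpr (he ▸ List.mem_map_of_mem hq))
      have hbk : pvBuckets rows w p.1 = [] := by
        simp only [pvBuckets, List.map_eq_nil_iff, List.filter_eq_nil_iff]
        intro q hq
        simpa using hnotrow q hq
      have hadd : PySem.Set.add (PySem.Set.ofList (rows.map (fun p => p.1))) p.1
          = PySem.Set.ofList (rows.map (fun p => p.1)) ++ [p.1] := by
        simp [PySem.Set.add, hmem]
      show (R.insert p.1 ((R.getD p.1 PySem.Dict.empty).modify
          (PySem.Int.floordiv p.2 w * w) 0 (· + 1))).items = _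
      rw [PySem.Dict.items_insert_of_not_contains _ _ hcon, ih, hset, hadd, List.map_append,
        hget]
      congr 1
      · apply List.map_congr_left
        intro h hmemh
        have hne : h ≠ p.1 := fun e => hmem (e ▸ hmemh)
        rw [pvBuckets_append, if_neg (fun e => hne e.symm), List.append_nil]
      · rw [List.map_singleton, pvBuckets_append, if_pos rfl, hbk, List.nil_append]
        rfl

-- B's dedupe-and-count inner loop, characterised: first occurrences in order, each with cnt b
theorem pvSelChar (cnt : Int → Int) (p : List Int) :
    (p.foldl (fun d b => if d.contains b then d else d.insert b (cnt b))
        (PySem.Dict.empty : PySem.Dict Int Int)).items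
      = (PySem.Set.ofList p).map (fun b => (b, cnt b)) := by
  induction p using List.reverseRecOn with
  | nil => rfl
  | append_singleton p b ih =>
    rw [List.foldl_append, List.foldl_cons, List.foldl_nil]
    set D := p.foldl (fun d b => if d.contains b then d else d.insert b (cnt b))
      (PySem.Dict.empty : PySem.Dict Int Int) with hD
    have hkeys : D.keys = PySem.Set.ofList p := by
      simp [PySem.Dict.keys, ih, List.map_map, Function.comp_def]
    have hset : PySem.Set.ofList (p ++ [b]) = PySem.Set.add (PySem.Set.ofList p) b := by
      rw [PySem.Set.ofList_eq_foldl, List.foldl_append, ← PySem.Set.ofList_eq_foldl]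
      rfl
    by_cases hmem : b ∈ PySem.Set.ofList p
    · have hcon : D.contains b = true :=
        (PySem.Dict.contains_iff_mem_keys D b).mpr (hkeys ▸ hmem)
      have hadd : PySem.Set.add (PySem.Set.ofList p) b = PySem.Set.ofList p := by
        simp [PySem.Set.add, hmem]
      rw [if_pos hcon, ih, hset, hadd]
    · have hcon : D.contains b = false := by
        by_contra hc
        exact hmem (hkeys ▸ (PySem.Dict.contains_iff_mem_keys D b).mp
          (by revert hc; cases D.contains b <;> simp))
      have hadd : PySem.Set.add (PySem.Set.ofList p) b = PySem.Set.ofList p ++ [b] := by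
        simp [PySem.Set.add, hmem]
      rw [if_neg (by simp [hcon]), PySem.Dict.items_insert_of_not_contains _ _ hcon, ih,
        hset, hadd, List.map_append, List.map_singleton]

-- ===== VERDICT (by name: the statement is the Claim_ definition above) =====
theorem bucketize_per_host_spec : Claim_equal_bucketize_per_host := by
  intro rows w _ _
  show bucketize_per_host rows w = bucketize_per_host_alt rows w
  simp only [bucketize_per_host, bucketize_per_host_alt]
  rw [pvAChar rows w]
  rw [PySem.Dict.items_foldl_insert_fresh _ (fun host => host) _ _
    (fun a _ => PySem.Dict.contains_empty a)
    (by simp [PySem.List.dedup, PySem.Set.nodup_ofList])]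
  show _ = (List.map _ _).map _
  rw [List.map_map, List.map_map]
  apply List.map_congr_left
  intro h _
  simp only [Function.comp]
  rw [pvSelChar, PySem.Dict.items_counter]
  rfl
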